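-- pv_equiv track=rewrite | github.com/kernelCruncher/Project-Euler | Project Euler 27.py | f
-- ===== SOURCE A (Python) =====
-- def IsPrime(x):
--     for i in list(range(2, int(x/2) + 1)):
--         if x % i == 0:
--             return False;
--     return True;
--
-- def f(x):
--     primeMax = 0;
--     prodAB = 0;
--     aMax = 0;
--     bMax = 0;
--     for a in list(range(-x+1, x)):
--         for b in list(range(2,x+1)):
--             n = 0;
--             primeCount = 0;
--             while n**2 + a*n + b > 0 and IsPrime(n**2 + a*n + b):
--                 n += 1;
--                 primeCount += 1;
--             if primeCount > primeMax:
--                 primeMax = primeCount;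
--                 aMax = a;
--                 bMax = b;
--                 prodAB = a*b;
--     return aMax, bMax, primeMax, prodAB;
-- ===== SOURCE B (Python) =====
-- def _no_small_factor(v):
--     # v has no divisor d with 2 <= d and d*d <= v.
--     # For v >= 2 this is exactly primality (a composite has a divisor below
--     # its square root); it also holds vacuously for v == 1, which is the same
--     # predicate A's trial division up to v/2 computes, at O(sqrt(v)) cost.
--     i = 2
--     while i * i <= v:
--         if v % i == 0:
--             return False
--         i += 1
--     return True
--
--
-- def f(x):
--     # b = value at n = 0 must itself pass the test, so only prime b can start
--     # a streak: precompute the primes once instead of rescanning 2..x per a.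
--     primes = [b for b in range(2, x + 1) if _no_small_factor(b)]
--     p_max = a_max = b_max = 0
--     for a in range(-x + 1, x):
--         for b in primes:
--             n = 0
--             while n * n + a * n + b > 0 and _no_small_factor(n * n + a * n + b):
--                 n += 1
--             if n > p_max:
--                 p_max, a_max, b_max = n, a, b
--     return a_max, b_max, p_max, a_max * b_max
-- ===== Notes on version B (the rewrite author's own statement) =====
-- stated objective: faster
-- what changed: B precomputes the list of prime b once (only a prime b can start a streak, so the per-a scan over composite b disappears) and tests each polynomial value by trial division only up to its square root instead of up to value/2.
import Mathlib
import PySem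

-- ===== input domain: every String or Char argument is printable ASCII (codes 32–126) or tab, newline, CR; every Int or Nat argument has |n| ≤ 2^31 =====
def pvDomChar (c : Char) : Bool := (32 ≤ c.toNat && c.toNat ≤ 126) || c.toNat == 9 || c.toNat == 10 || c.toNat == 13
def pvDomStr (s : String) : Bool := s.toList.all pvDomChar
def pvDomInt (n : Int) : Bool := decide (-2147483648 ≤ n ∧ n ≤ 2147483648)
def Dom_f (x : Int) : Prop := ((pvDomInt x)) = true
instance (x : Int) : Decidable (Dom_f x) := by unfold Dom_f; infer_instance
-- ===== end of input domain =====

-- B is faster: it scans only precomputed prime b's and trial-divides only up to sqrt(v).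

-- Shared totality guard for the two (terminating) Python while-loops: the streak
-- always ends by n = b*(|a|+1) ≤ x*x, so this fuel is never exhausted.
def fuel_f (x : Int) : Nat := (x * x + 2 * x + 4).toNat

-- ===== PORT A =====
-- IsPrime: trial division for i in range(2, int(v/2)+1); early 'return False' = List.all.
-- int(v/2) is ported as floor division v//2, exact for the positive v that f reaches.
def isPrimeA (v : Int) : Bool :=
  (PySem.List.pyRange 2 (PySem.Int.floordiv v 2 + 1) 1).all (fun i => !(PySem.Int.mod v i == 0))

-- the while loop: state (n, primeCount), both incremented together
def loopA (a b : Int) : Nat → Int → Int → Int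
  | 0, _, pc => pc
  | Nat.succ fl, n, pc =>
    if n ^ 2 + a * n + b > 0 && isPrimeA (n ^ 2 + a * n + b) then
      loopA a b fl (n + 1) (pc + 1)
    else pc

-- body of the b-loop; state (primeMax, prodAB, aMax, bMax)
def stepA (x a : Int) (s : Int × Int × Int × Int) (b : Int) : Int × Int × Int × Int :=
  let pc := loopA a b (fuel_f x) 0 0
  if pc > s.1 then (pc, a * b, a, b) else s

def f (x : Int) : List Int :=
  let s := (PySem.List.pyRange (-x + 1) x 1).foldl
    (fun s a => (PySem.List.pyRange 2 (x + 1) 1).foldl (stepA x a) s)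
    (0, 0, 0, 0)
  [s.2.2.1, s.2.2.2, s.1, s.2.1]

-- ===== PORT B =====
-- while i*i <= v: …; i += 1  — the '2 ≤ i' conjunct is a totality guard only
-- (i starts at 2 and only grows, so it is always true on reachable states).
def nsfAux (v i : Int) : Bool :=
  if h : 2 ≤ i ∧ i * i ≤ v then
    if PySem.Int.mod v i == 0 then false else nsfAux v (i + 1)
  else true
termination_by (v + 1 - i).toNat
decreasing_by
  have hi : i ≤ i * i := by nlinarith [h.1]
  omega

def noSmallFactorB (v : Int) : Bool := nsfAux v 2

-- the streak-counting while loop of B (only n is tracked)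
def loopB (a b : Int) : Nat → Int → Int
  | 0, n => n
  | Nat.succ fl, n =>
    if n * n + a * n + b > 0 && noSmallFactorB (n * n + a * n + b) then
      loopB a b fl (n + 1)
    else n

-- body of the b-loop; state (p_max, a_max, b_max)
def stepB (x a : Int) (s : Int × Int × Int) (b : Int) : Int × Int × Int :=
  let n := loopB a b (fuel_f x) 0
  if n > s.1 then (n, a, b) else s

def f_alt (x : Int) : List Int :=
  let primes := (PySem.List.pyRange 2 (x + 1) 1).filter noSmallFactorB
  let s := (PySem.List.pyRange (-x + 1) x 1).foldl
    (fun s a => primes.foldl (stepB x a) s) (0, 0, 0)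
  [s.2.1, s.2.2, s.1, s.2.1 * s.2.2]

-- ===== PRECONDITION & SPEC =====
def Spec_f (x : Int) (out : List Int) : Prop := out = f_alt x
instance (x : Int) (out : List Int) : Decidable (Spec_f x out) := by unfold Spec_f; infer_instance

-- ===== CLAIM (what is proved, stated in full; the proofs are below) =====
def Claim_equal_f : Prop := ∀ (x : Int), Dom_f x → Spec_f x (f x)

-- ===== LEMMAS AND PROOFS =====

-- relation between A's state (primeMax, prodAB, aMax, bMax) and B's (p, a, b)
def convSt (s : Int × Int × Int) : Int × Int × Int × Int := (s.1, s.2.1 * s.2.2, s.2.1, s.2.2)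

theorem nsfAux_iff (v i : Int) (hi : 2 ≤ i) :
    nsfAux v i = true ↔ ∀ d : Int, i ≤ d → d * d ≤ v → ¬ d ∣ v := by
  revert hi
  induction i using nsfAux.induct v with
  | case1 i h hmod =>
    intro hi
    have hfalse : nsfAux v i = false := by rw [nsfAux]; simp [h, hmod]
    rw [hfalse]
    simp only [Bool.false_eq_true, false_iff]
    push_neg
    refine ⟨i, le_refl i, h.2, ?_⟩
    exact (PySem.Int.mod_eq_zero_iff_dvd v i).mp (by simpa using hmod)
  | case2 i h hmod ih =>
    intro hi
    have hstep : nsfAux v i = nsfAux v (i + 1) := by rw [nsfAux]; simp [h, hmod]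
    rw [hstep, ih (by omega)]
    constructor
    · intro hrec d hd hdd
      rcases eq_or_lt_of_le hd with heq | hlt
      · intro hdv
        apply hmod
        have hm : PySem.Int.mod v d = 0 := (PySem.Int.mod_eq_zero_iff_dvd v d).mpr hdv
        rw [heq]
        simp [hm]
      · exact hrec d (by omega) hdd
    · intro hrec d hd hdd
      exact hrec d (by omega) hdd
  | case3 i h =>
    intro hi
    have htrue : nsfAux v i = true := by rw [nsfAux]; simp [h]
    rw [htrue]
    simp only [true_iff]
    intro d hd hdd
    exfalso
    have hvi : ¬ i * i ≤ v := fun hc => h ⟨hi, hc⟩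
    nlinarith

theorem isPrimeA_iff (v : Int) (_hv : 0 < v) :
    isPrimeA v = true ↔ ∀ d : Int, 2 ≤ d → d ≤ PySem.Int.floordiv v 2 → ¬ d ∣ v := by
  unfold isPrimeA
  rw [List.all_eq_true]
  constructor
  · intro h d hd2 hdfd hdv
    have hmem : d ∈ PySem.List.pyRange 2 (PySem.Int.floordiv v 2 + 1) 1 :=
      PySem.List.mem_pyRange_one.mpr ⟨hd2, by omega⟩
    have := h d hmem
    simp only [Bool.not_eq_eq_eq_not, Bool.not_true, beq_eq_false_iff_ne, ne_eq] at this
    exact this ((PySem.Int.mod_eq_zero_iff_dvd v d).mpr hdv)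
  · intro h i hmem
    obtain ⟨h2, hlt⟩ := PySem.List.mem_pyRange_one.mp hmem
    simp only [Bool.not_eq_eq_eq_not, Bool.not_true, beq_eq_false_iff_ne, ne_eq]
    intro hmod
    exact h i h2 (by omega) ((PySem.Int.mod_eq_zero_iff_dvd v i).mp hmod)

theorem pred_eq (v : Int) (hv : 0 < v) : isPrimeA v = noSmallFactorB v := by
  have hfd : PySem.Int.floordiv v 2 = v / 2 := PySem.Int.floordiv_eq_ediv_of_pos (by norm_num)
  rw [Bool.eq_iff_iff, isPrimeA_iff v hv]
  unfold noSmallFactorB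
  rw [nsfAux_iff v 2 (le_refl 2)]
  constructor
  · intro h d hd2 hdd hdv
    have h2d : 2 * d ≤ v := by nlinarith
    exact h d hd2 (by rw [hfd]; omega) hdv
  · intro h d hd2 hdfd hdv
    have hd0 : (0 : Int) < d := by omega
    obtain ⟨e, he⟩ := hdv
    have h2d : 2 * d ≤ v := by rw [hfd] at hdfd; omega
    have he2 : 2 ≤ e := by nlinarith
    by_cases hdd : d * d ≤ v
    · exact h d hd2 hdd ⟨e, he⟩
    · push_neg at hdd
      have hed : e < d := by nlinarith
      have hee : e * e ≤ v := by nlinarith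
      exact h e he2 hee ⟨d, by rw [he]; ring⟩

theorem guard_eq (a b n : Int) :
    (decide (n ^ 2 + a * n + b > 0) && isPrimeA (n ^ 2 + a * n + b))
      = (decide (n * n + a * n + b > 0) && noSmallFactorB (n * n + a * n + b)) := by
  rw [pow_two]
  by_cases hv : 0 < n * n + a * n + b
  · rw [pred_eq _ hv]
  · simp [hv]

theorem loopA_eq (a b : Int) (fl : Nat) (n pc : Int) :
    loopA a b fl n pc = loopB a b fl n + (pc - n) := by
  induction fl generalizing n pc with
  | zero => simp [loopA, loopB]
  | succ fl ih =>
    simp only [loopA, loopB]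
    rw [guard_eq a b n]
    split
    · rw [ih (n + 1) (pc + 1)]; ring
    · ring

theorem loopB_ge (a b : Int) (fl : Nat) (n : Int) : n ≤ loopB a b fl n := by
  induction fl generalizing n with
  | zero => simp [loopB]
  | succ fl ih =>
    simp only [loopB]
    split
    · exact le_trans (by omega) (ih (n + 1))
    · exact le_refl n

theorem loopB_zero (a b : Int) (fl : Nat) (hb : noSmallFactorB b = false) :
    loopB a b fl 0 = 0 := by
  cases fl with
  | zero => simp [loopB]
  | succ fl => simp [loopB, hb]

theorem inner_eq (x a : Int) (l : List Int) (s : Int × Int × Int) (hs : 0 ≤ s.1) :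
    l.foldl (stepA x a) (convSt s)
      = convSt ((l.filter noSmallFactorB).foldl (stepB x a) s)
    ∧ 0 ≤ ((l.filter noSmallFactorB).foldl (stepB x a) s).1 := by
  induction l generalizing s with
  | nil => exact ⟨rfl, hs⟩
  | cons b t ih =>
    by_cases hb : noSmallFactorB b = true
    · simp only [List.foldl_cons, List.filter_cons, hb, if_pos]
      have hcount : loopA a b (fuel_f x) 0 0 = loopB a b (fuel_f x) 0 := by
        rw [loopA_eq]; ring
      have hpos : 0 ≤ loopB a b (fuel_f x) 0 := loopB_ge a b (fuel_f x) 0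
      by_cases hgt : loopB a b (fuel_f x) 0 > s.1
      · have hA : stepA x a (convSt s) b = convSt (loopB a b (fuel_f x) 0, a, b) := by
          simp [stepA, convSt, hcount, hgt]
        have hB : stepB x a s b = (loopB a b (fuel_f x) 0, a, b) := by
          simp [stepB, hgt]
        rw [hA, hB]
        exact ih (loopB a b (fuel_f x) 0, a, b) hpos
      · have hA : stepA x a (convSt s) b = convSt s := by
          simp [stepA, convSt, hcount, hgt]
        have hB : stepB x a s b = s := by
          simp [stepB, hgt]
        rw [hA, hB]
        exact ih s hs
    · have hbf : noSmallFactorB b = false := by simpa using hb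
      simp only [List.foldl_cons, List.filter_cons, hbf, Bool.false_eq_true, if_neg,
        not_false_iff]
      have hA : stepA x a (convSt s) b = convSt s := by
        have hcount : loopA a b (fuel_f x) 0 0 = 0 := by
          rw [loopA_eq, loopB_zero a b _ hbf]; ring
        simp only [stepA, hcount, convSt]
        have : ¬ ((0 : Int) > s.1) := by omega
        simp [this]
      rw [hA]
      exact ih s hs

theorem outer_eq (x : Int) (l : List Int) (s : Int × Int × Int) (hs : 0 ≤ s.1) :
    l.foldl (fun s a => (PySem.List.pyRange 2 (x + 1) 1).foldl (stepA x a) s) (convSt s)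
      = convSt (l.foldl (fun s a => ((PySem.List.pyRange 2 (x + 1) 1).filter noSmallFactorB).foldl (stepB x a) s) s)
    ∧ 0 ≤ (l.foldl (fun s a => ((PySem.List.pyRange 2 (x + 1) 1).filter noSmallFactorB).foldl (stepB x a) s) s).1 := by
  induction l generalizing s with
  | nil => exact ⟨rfl, hs⟩
  | cons a t ih =>
    simp only [List.foldl_cons]
    obtain ⟨h1, h2⟩ := inner_eq x a (PySem.List.pyRange 2 (x + 1) 1) s hs
    rw [h1]
    exact ih _ h2

-- ===== VERDICT (by name: the statement is the Claim_ definition above) =====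
theorem f_spec : Claim_equal_f := by
  intro x _
  unfold Spec_f f f_alt
  have h := (outer_eq x (PySem.List.pyRange (-x + 1) x 1) (0, 0, 0) (le_refl 0)).1
  simp only [convSt, mul_zero] at h
  simp only [h]
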